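-- pv_equiv track=rewrite | github.com/piotrcurious/SunTracker_ultra | heliostat/atmega8/lfsr/polysearch/search2_5.py | generate_lfsr_sequence
-- ===== SOURCE A (Python) =====
-- from typing import List, Tuple
--
-- def generate_lfsr_sequence(coeffs: List[int], length: int, modulus: int) -> List[int]:
--     """
--     Generate an LFSR sequence based on coefficients.
--
--     :param coeffs: Polynomial coefficients for the LFSR.
--     :param length: Length of the sequence to generate.
--     :param modulus: Modulus for the finite field.
--     :return: List of LFSR output values.
--     """
--     state = [1] * len(coeffs)  # Initial state
--     output = []
--     for _ in range(length):
--         output.append(state[-1])  # Output is the last bit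
--         feedback = sum(c * state[i] for i, c in enumerate(coeffs[:-1])) % modulus
--         state = [feedback] + state[:-1]
--     return output
-- ===== SOURCE B (Python) =====
-- def generate_lfsr_sequence(coeffs, length, modulus):
--     k = len(coeffs)
--     out = [1] * max(0, min(k, length))
--     for n in range(len(out), max(0, length)):
--         out.append(sum(c * out[n - 1 - i] for i, c in enumerate(coeffs[:-1])) % modulus)
--     return out
-- ===== Notes on version B (the rewrite author's own statement) =====
-- stated objective: simpler
-- what changed: B drops A's shifting state register entirely and computes each output directly by the linear recurrence over the already-produced output list: the first min(len(coeffs), length) outputs are literal 1, then out[n] = sum(coeffs[i]*out[n-1-i] for i < len(coeffs)-1) % modulus.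
import Mathlib
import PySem

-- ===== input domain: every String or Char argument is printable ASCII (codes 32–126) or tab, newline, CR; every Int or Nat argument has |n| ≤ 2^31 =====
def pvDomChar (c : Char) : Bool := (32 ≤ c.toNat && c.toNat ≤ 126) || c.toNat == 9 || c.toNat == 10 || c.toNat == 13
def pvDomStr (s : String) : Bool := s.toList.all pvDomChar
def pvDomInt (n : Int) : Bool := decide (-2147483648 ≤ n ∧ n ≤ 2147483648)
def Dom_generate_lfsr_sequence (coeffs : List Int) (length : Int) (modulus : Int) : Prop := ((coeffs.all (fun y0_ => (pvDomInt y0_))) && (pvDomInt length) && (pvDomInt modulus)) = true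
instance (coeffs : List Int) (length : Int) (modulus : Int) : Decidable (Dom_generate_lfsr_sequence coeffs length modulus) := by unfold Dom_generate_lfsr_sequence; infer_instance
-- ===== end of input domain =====

-- B replaces A's shifting state register by a direct linear recurrence over the output list (simpler decomposition, same cost).

-- ===== PORT A =====
-- one loop body of A: append state[-1] to output, compute feedback from coeffs[:-1] and state, shift the register
def lfsrStepA (coeffs : List Int) (modulus : Int) (st : List Int × List Int) : List Int × List Int :=
  let output := st.2 ++ [(PySem.List.pyGet? st.1 (-1)).getD 0]
  let feedback := PySem.Int.mod ((coeffs.dropLast.zipIdx).foldl (fun a ci => a + ci.1 * st.1.getD ci.2 0) 0) modulus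
  (feedback :: st.1.dropLast, output)

def generate_lfsr_sequence (coeffs : List Int) (length : Int) (modulus : Int) : List Int :=
  ((List.range length.toNat).foldl (fun st _ => lfsrStepA coeffs modulus st)
    (List.replicate coeffs.length (1 : Int), ([] : List Int))).2

-- ===== PORT B =====
-- out[n-1-i] is always a nonnegative in-range index when the loop runs (n ≥ len(coeffs) ≥ 1, i ≤ len(coeffs)-2), so Nat getD is exact
def generate_lfsr_sequence_alt (coeffs : List Int) (length : Int) (modulus : Int) : List Int :=
  let out0 : List Int := List.replicate (max 0 (min (coeffs.length : Int) length)).toNat 1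
  (List.range' out0.length ((max 0 length).toNat - out0.length)).foldl
    (fun out n =>
      out ++ [PySem.Int.mod ((coeffs.dropLast.zipIdx).foldl
        (fun a ci => a + ci.1 * out.getD (n - 1 - ci.2) 0) 0) modulus])
    out0

-- ===== PRECONDITION & SPEC =====
-- Pre_ excludes exactly the inputs where A raises: with length > 0, empty coeffs makes state[-1] an IndexError
-- and modulus == 0 makes the per-step modulo a ZeroDivisionError.
def Pre_generate_lfsr_sequence (coeffs : List Int) (length : Int) (modulus : Int) : Prop :=
  length ≤ 0 ∨ (coeffs ≠ [] ∧ modulus ≠ 0)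
instance (coeffs : List Int) (length : Int) (modulus : Int) : Decidable (Pre_generate_lfsr_sequence coeffs length modulus) := by unfold Pre_generate_lfsr_sequence; infer_instance

def pvWitness_generate_lfsr_sequence : List Int × Int × Int := ([1, 1, 0, 1], 10, 2)

def Spec_generate_lfsr_sequence (coeffs : List Int) (length : Int) (modulus : Int) (out : List Int) : Prop := out = generate_lfsr_sequence_alt coeffs length modulus
instance (coeffs : List Int) (length : Int) (modulus : Int) (out : List Int) : Decidable (Spec_generate_lfsr_sequence coeffs length modulus out) := by unfold Spec_generate_lfsr_sequence; infer_instance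

-- ===== CLAIM (what is proved, stated in full; the proofs are below) =====
def Claim_equal_generate_lfsr_sequence : Prop := ∀ (coeffs : List Int) (length : Int) (modulus : Int), Dom_generate_lfsr_sequence coeffs length modulus → Pre_generate_lfsr_sequence coeffs length modulus → Spec_generate_lfsr_sequence coeffs length modulus (generate_lfsr_sequence coeffs length modulus)

-- ===== LEMMAS AND PROOFS =====

-- the common extended history: k initial ones followed by the successive feedback values
def lfsrFb (coeffs : List Int) (modulus : Int) (E : List Int) : Int :=
  PySem.Int.mod ((coeffs.dropLast.zipIdx).foldl (fun a ci => a + ci.1 * E.getD (E.length - 1 - ci.2) 0) 0) modulus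

def lfsrE (coeffs : List Int) (modulus : Int) : Nat → List Int
  | 0 => List.replicate coeffs.length 1
  | t + 1 => lfsrE coeffs modulus t ++ [lfsrFb coeffs modulus (lfsrE coeffs modulus t)]

theorem lfsrE_length (coeffs : List Int) (modulus : Int) (t : Nat) :
    (lfsrE coeffs modulus t).length = t + coeffs.length := by
  induction t with
  | zero => simp [lfsrE]
  | succ t ih => simp [lfsrE, ih]; omega

-- prefixes of lfsrE are stable
theorem lfsrE_take (coeffs : List Int) (modulus : Int) (t u n : Nat) (h : n ≤ t + coeffs.length) :
    (lfsrE coeffs modulus (t + u)).take n = (lfsrE coeffs modulus t).take n := by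
  induction u with
  | zero => rfl
  | succ u ih =>
      have : lfsrE coeffs modulus (t + (u + 1)) =
          lfsrE coeffs modulus (t + u) ++ [lfsrFb coeffs modulus (lfsrE coeffs modulus (t + u))] := rfl
      rw [show t + (u + 1) = (t + u) + 1 from rfl]
      rw [lfsrE, List.take_append_of_le_length (by rw [lfsrE_length]; omega), ih]

-- A's fold has invariant: state = reverse of the last k entries of lfsrE, output = first t entries
theorem getD_rev_drop (E : List Int) (T i : Nat) (hi : i < E.length - T) :
    ((E.drop T).reverse).getD i 0 = E.getD (E.length - 1 - i) 0 := by
  rw [List.getD_eq_getElem?_getD, List.getD_eq_getElem?_getD,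
    List.getElem?_reverse (by simp; omega), List.getElem?_drop]
  congr 2
  simp
  omega

theorem lfsrA_inv (coeffs : List Int) (modulus : Int) (hk : coeffs ≠ []) (T : Nat) :
    (List.range T).foldl (fun st _ => lfsrStepA coeffs modulus st)
      (List.replicate coeffs.length (1 : Int), ([] : List Int)) =
    (((lfsrE coeffs modulus T).drop T).reverse, (lfsrE coeffs modulus T).take T) := by
  have hk1 : 0 < coeffs.length := List.length_pos_of_ne_nil hk
  induction T with
  | zero => simp [lfsrE]
  | succ T ih =>
    rw [List.range_succ, List.foldl_append, ih]
    simp only [List.foldl_cons, List.foldl_nil]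
    have hlen : (lfsrE coeffs modulus T).length = T + coeffs.length := lfsrE_length coeffs modulus T
    set E := lfsrE coeffs modulus T with hE
    have hE1 : lfsrE coeffs modulus (T + 1) = E ++ [lfsrFb coeffs modulus E] := rfl
    apply Prod.ext
    · -- state component
      simp only [lfsrStepA, hE1]
      rw [List.drop_append_of_le_length (by omega), List.reverse_append, List.reverse_singleton]
      simp only [List.singleton_append, List.cons.injEq]
      constructor
      · unfold lfsrFb
        congr 1
        apply PySem.List.foldl_congr_mem
        intro acc ci hci
        have hci3 : ci.2 < coeffs.length - 1 := by
          have hlt := List.snd_lt_of_mem_zipIdx hci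
          simp only [List.length_dropLast] at hlt
          omega
        rw [getD_rev_drop E T ci.2 (by omega)]
      · rw [← List.tail_drop, ← List.dropLast_reverse]
    · -- output component
      simp only [lfsrStepA, hE1]
      rw [List.take_append_of_le_length (by omega), List.take_add_one,
        PySem.List.pyGet?_neg_one, List.getLast?_reverse, List.head?_drop,
        List.getElem?_eq_getElem (by omega)]
      rfl

-- B's loop from out0 = lfsrE 0 builds lfsrE j
theorem lfsrB_inv (coeffs : List Int) (modulus : Int) (j : Nat) :
    (List.range' coeffs.length j).foldl
      (fun out n =>
        out ++ [PySem.Int.mod ((coeffs.dropLast.zipIdx).foldl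
          (fun a ci => a + ci.1 * out.getD (n - 1 - ci.2) 0) 0) modulus])
      (List.replicate coeffs.length (1 : Int)) = lfsrE coeffs modulus j := by
  induction j with
  | zero => rfl
  | succ j ih =>
    rw [List.range'_concat, List.foldl_append, ih]
    simp only [List.foldl_cons, List.foldl_nil, Nat.one_mul]
    have hE1 : lfsrE coeffs modulus (j + 1) = lfsrE coeffs modulus j ++ [lfsrFb coeffs modulus (lfsrE coeffs modulus j)] := rfl
    rw [hE1]
    congr 2
    unfold lfsrFb
    rw [lfsrE_length]
    rw [Nat.add_comm coeffs.length j]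

-- ===== VERDICT (by name: the statement is the Claim_ definition above) =====
theorem generate_lfsr_sequence_spec : Claim_equal_generate_lfsr_sequence := by
  intro coeffs length modulus _ hpre
  unfold Spec_generate_lfsr_sequence generate_lfsr_sequence generate_lfsr_sequence_alt
  by_cases hl : length ≤ 0
  · have h1 : length.toNat = 0 := by omega
    have h2 : (max 0 (min (coeffs.length : Int) length)).toNat = 0 := by omega
    have h3 : (max 0 length).toNat = 0 := by omega
    simp [h1, h2, h3]
  · obtain ⟨hk, hm⟩ := hpre.resolve_left hl
    have hk1 : 0 < coeffs.length := List.length_pos_of_ne_nil hk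
    have hT : 0 < length.toNat := by omega
    rw [lfsrA_inv coeffs modulus hk length.toNat]
    by_cases hTk : length.toNat ≤ coeffs.length
    · have h2 : (max 0 (min (coeffs.length : Int) length)).toNat = length.toNat := by omega
      have h3 : (max 0 length).toNat = length.toNat := by omega
      simp only [h2, h3, List.length_replicate, Nat.sub_self, List.range'_zero, List.foldl_nil]
      have hpre : (lfsrE coeffs modulus (0 + length.toNat)).take length.toNat
          = (lfsrE coeffs modulus 0).take length.toNat :=
        lfsrE_take coeffs modulus 0 length.toNat length.toNat (by omega)
      rw [Nat.zero_add] at hpre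
      rw [hpre]
      simp only [lfsrE, List.take_replicate]
      rw [Nat.min_eq_left hTk]
    · have h2 : (max 0 (min (coeffs.length : Int) length)).toNat = coeffs.length := by omega
      have h3 : (max 0 length).toNat = length.toNat := by omega
      simp only [h2, h3, List.length_replicate]
      rw [lfsrB_inv coeffs modulus (length.toNat - coeffs.length)]
      have e1 : length.toNat - coeffs.length + coeffs.length = length.toNat := by omega
      have hpre := lfsrE_take coeffs modulus (length.toNat - coeffs.length) coeffs.length length.toNat (by omega)
      rw [e1] at hpre
      rw [hpre, List.take_of_length_le (by rw [lfsrE_length]; omega)]
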